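-- pv_equiv track=rewrite | github.com/CianLR/judge-solutions | advent_of_code/2023/day01/first.py | extract_int
-- ===== SOURCE A (Python) =====
-- def extract_int(l):
--   i = ''
--   for c in l:
--     if c.isdigit():
--       i += c
--       break
--   for c in reversed(l):
--     if c.isdigit():
--       i += c
--       break
--   return int(i)
-- ===== SOURCE B (Python) =====
-- def extract_int(l):
--   ds = [c for c in l if c.isdigit()]
--   return int(ds[0] + ds[-1])
-- ===== Notes on version B (the rewrite author's own statement) =====
-- stated objective: simpler
-- what changed: One forward pass collects all digits into a list, then the answer is built from its first and last element, replacing A's two separate short-circuiting scans (forward and reversed) with string accumulation.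
import Mathlib
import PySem

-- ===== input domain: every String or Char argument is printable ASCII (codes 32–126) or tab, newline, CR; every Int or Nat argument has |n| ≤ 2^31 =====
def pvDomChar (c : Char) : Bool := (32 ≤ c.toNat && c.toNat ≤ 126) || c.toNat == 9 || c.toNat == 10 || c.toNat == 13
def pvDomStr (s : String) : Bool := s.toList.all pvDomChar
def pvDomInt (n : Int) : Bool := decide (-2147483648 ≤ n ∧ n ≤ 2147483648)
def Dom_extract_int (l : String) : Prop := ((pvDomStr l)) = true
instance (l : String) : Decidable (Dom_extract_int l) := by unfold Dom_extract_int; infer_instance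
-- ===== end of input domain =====

-- B collects every digit in one forward pass and indexes its ends, instead of A's two short-circuiting scans; objective: simpler.

-- ===== PORT A =====
-- 'for c in …: if c.isdigit(): i += c; break' — scan, append the first digit to i, stop
def pvScanA : List Char → List Char → List Char
  | [], i => i
  | c :: rest, i => if PySem.Chars.isdigit c then i ++ [c] else pvScanA rest i

def extract_int (l : String) : Int :=
  let i1 := pvScanA l.toList []
  let i2 := pvScanA l.toList.reverse i1
  -- int(i): Python raises ValueError when i is not an int literal; Pre_ excludes that
  (PySem.Int.ofChars? i2).getD 0

-- ===== PORT B =====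
def extract_int_alt (l : String) : Int :=
  let ds := l.toList.filter PySem.Chars.isdigit
  -- ds[0], ds[-1]: IndexError on empty ds is excluded by Pre_
  match PySem.List.pyGet? ds 0, PySem.List.pyGet? ds (-1) with
  | some a, some b => (PySem.Int.ofChars? [a, b]).getD 0
  | _, _ => 0

-- ===== PRECONDITION & SPEC =====
-- Pre_ excludes exactly the strings with no digit, where A raises ValueError (int of an empty accumulator) and B raises IndexError.
def Pre_extract_int (l : String) : Prop := l.toList.any PySem.Chars.isdigit = true
instance (l : String) : Decidable (Pre_extract_int l) := by unfold Pre_extract_int; infer_instance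
def pvWitness_extract_int : String := "a1b2c"

def Spec_extract_int (l : String) (out : Int) : Prop := out = extract_int_alt l
instance (l : String) (out : Int) : Decidable (Spec_extract_int l out) := by unfold Spec_extract_int; infer_instance

-- ===== CLAIM (what is proved, stated in full; the proofs are below) =====
def Claim_equal_extract_int : Prop := ∀ (l : String), Dom_extract_int l → Pre_extract_int l → Spec_extract_int l (extract_int l)

-- ===== LEMMAS AND PROOFS =====

-- A's break-scan appends exactly the first digit: take 1 of the filter
theorem pvScanA_eq_filter_take (cs i : List Char) :
    pvScanA cs i = i ++ (cs.filter PySem.Chars.isdigit).take 1 := by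
  induction cs generalizing i with
  | nil => simp [pvScanA]
  | cons c rest ih =>
    by_cases h : PySem.Chars.isdigit c
    · simp [pvScanA, h]
    · simp [pvScanA, h, ih]

-- ===== VERDICT (by name: the statement is the Claim_ definition above) =====
theorem extract_int_spec : Claim_equal_extract_int := by
  intro l _ hpre
  unfold Spec_extract_int extract_int extract_int_alt
  have hne : l.toList.filter PySem.Chars.isdigit ≠ [] := by
    simp only [Pre_extract_int, List.any_eq_true] at hpre
    obtain ⟨c, hc, hd⟩ := hpre
    exact List.ne_nil_of_mem (List.mem_filter.mpr ⟨hc, hd⟩)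
  obtain ⟨d, ds, hds⟩ := List.exists_cons_of_ne_nil hne
  simp only [pvScanA_eq_filter_take, List.filter_reverse, hds]
  have htake : (d :: ds).reverse.take 1 = [(d :: ds).getLast (by simp)] := by
    cases h : (d :: ds).reverse with
    | nil => simp at h
    | cons x xs =>
      have hx : x = (d :: ds).getLast (by simp) := by
        rw [List.getLast_eq_head_reverse]; simp [h]
      simp [hx]
  rw [htake]
  have hget0 : PySem.List.pyGet? (d :: ds) 0 = some d := by
    simp [PySem.List.pyGet?, PySem.List.pyIdx?]
  have hgetm1 : PySem.List.pyGet? (d :: ds) (-1) = some ((d :: ds).getLast (by simp)) := by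
    simp [PySem.List.pyGet?, PySem.List.pyIdx?, List.getLast_eq_getElem]
    rfl
  rw [hget0, hgetm1]
  simp
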